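-- pv_equiv track=rewrite | github.com/wmvanstone/RPiShakeCode | 039-Puerto-Rico-section-write-P-amplitudes-2020-01-07.py | parse
-- ===== SOURCE A (Python) =====
-- def parse(string):
--     out = [""]
--     counter = 0
--     for l in string:
--         if l.upper() in "ABCDEFGHIJKLMNOPQRSTUVWXYZ0123456789.:-,":
--             if ord(l) == 44:
--                 counter += 1
--                 out.append("")
--             else:
--                 out[counter] += l
--     return out
-- ===== SOURCE B (Python) =====
-- def parse(string):
--     allowed = "ABCDEFGHIJKLMNOPQRSTUVWXYZ0123456789.:-,"
--     filtered = "".join(l for l in string if l.upper() in allowed)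
--     return filtered.split(",")
-- ===== Notes on version B (the rewrite author's own statement) =====
-- stated objective: simpler
-- what changed: Replaces A's single fused loop that maintains a mutable segment list, a counter index and per-character string concatenation with two separate passes: a join-based filtering pass keeping the allowed characters, then the standard comma split of the filtered string.
import Mathlib
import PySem

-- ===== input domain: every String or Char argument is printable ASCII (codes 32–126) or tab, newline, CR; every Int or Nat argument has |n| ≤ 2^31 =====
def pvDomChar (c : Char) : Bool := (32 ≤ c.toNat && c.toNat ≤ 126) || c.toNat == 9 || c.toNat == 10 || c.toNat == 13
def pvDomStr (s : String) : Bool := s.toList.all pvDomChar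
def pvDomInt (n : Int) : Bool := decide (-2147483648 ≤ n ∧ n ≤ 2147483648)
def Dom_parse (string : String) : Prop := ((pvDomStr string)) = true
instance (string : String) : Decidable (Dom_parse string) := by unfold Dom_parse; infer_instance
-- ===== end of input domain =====

-- B = two separate passes (filter, then str.split on the comma) instead of A's single fused loop
-- with a manual segment counter and per-character string concatenation; simpler, and the timing
-- run measured B faster.  Segments are built as List Char (PySem.Chars style), String at the end.

-- the literal "ABCDEFGHIJKLMNOPQRSTUVWXYZ0123456789.:-," both Pythons test membership in
def parseAllowed : List Char := "ABCDEFGHIJKLMNOPQRSTUVWXYZ0123456789.:-,".toList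

-- `l.upper() in "ABC…,"` — substring test of the one-char string l.upper(), exactly as in Python
def parseCond (l : Char) : Bool := PySem.Chars.isIn [PySem.Chars.upperChar l] parseAllowed

-- ===== PORT A =====
-- state: (out, counter); `out[counter] += l` is List.modify at counter, `out.append("")` is ++ [[]]
def parseStep (st : List (List Char) × Nat) (l : Char) : List (List Char) × Nat :=
  if parseCond l then
    if l.toNat = 44 then (st.1 ++ [[]], st.2 + 1)
    else (st.1.modify st.2 (fun s => s ++ [l]), st.2)
  else st

def parse (string : String) : List String :=
  ((string.toList.foldl parseStep ([[]], 0)).1).map String.ofList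

-- ===== PORT B =====
-- filtered = "".join(l for l in string if l.upper() in allowed);  filtered.split(",")
def parse_alt (string : String) : List String :=
  let filtered := string.toList.filter parseCond
  (PySem.Chars.splitOn filtered [',']).map String.ofList

-- ===== PRECONDITION & SPEC =====
def Spec_parse (string : String) (out : List String) : Prop := out = parse_alt string
instance (string : String) (out : List String) : Decidable (Spec_parse string out) := by unfold Spec_parse; infer_instance

-- ===== CLAIM (what is proved, stated in full; the proofs are below) =====
def Claim_equal_parse : Prop := ∀ (string : String), Dom_parse string → Spec_parse string (parse string)

-- ===== LEMMAS AND PROOFS =====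

-- straightforward structural split on ',' used as the common characterisation
def simpleSplit : List Char → List (List Char)
  | [] => [[]]
  | c :: rest =>
    if c = ',' then [] :: simpleSplit rest
    else
      match simpleSplit rest with
      | p :: ps => (c :: p) :: ps
      | [] => [[c]]

theorem simpleSplit_ne_nil (cs : List Char) : simpleSplit cs ≠ [] := by
  cases cs with
  | nil => simp [simpleSplit]
  | cons c rest =>
    simp only [simpleSplit]
    split
    · simp
    · cases h : simpleSplit rest <;> simp

theorem char_comma_iff (c : Char) : c.toNat = 44 ↔ c = ',' := by
  constructor
  · intro h
    apply Char.ext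
    apply UInt32.toNat_inj.mp
    simpa using h
  · intro h; subst h; rfl

theorem splitOn_go_comma (fuel : Nat) (l cur : List Char) (acc : List (List Char))
    (h : l.length < fuel) :
    PySem.Chars.splitOn.go [','] fuel l cur acc
      = acc.reverse ++ ((cur.reverse ++ (simpleSplit l).headI) :: (simpleSplit l).tail) := by
  induction fuel generalizing l cur acc with
  | zero => omega
  | succ n ih =>
    cases l with
    | nil =>
      simp [PySem.Chars.splitOn.go, simpleSplit]
    | cons c rest =>
      rw [PySem.Chars.splitOn.go]
      by_cases hc : c = ','
      · subst hc
        rw [if_pos (by simp [List.isPrefixOf])]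
        have hd : List.drop [','].length (',' :: rest) = rest := rfl
        rw [hd, ih rest [] (cur.reverse :: acc) (by simpa using Nat.lt_of_succ_lt_succ h)]
        have hne := simpleSplit_ne_nil rest
        cases hs : simpleSplit rest with
        | nil => exact absurd hs hne
        | cons p ps => simp [simpleSplit, hs]
      · rw [if_neg (by simp [List.isPrefixOf]; exact fun hh => absurd hh.symm hc)]
        rw [ih rest (c :: cur) acc (by simpa using Nat.lt_of_succ_lt_succ h)]
        have hne := simpleSplit_ne_nil rest
        cases hs : simpleSplit rest with
        | nil => exact absurd hs hne
        | cons p ps => simp [simpleSplit, hc, hs]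

theorem splitOn_comma (cs : List Char) :
    PySem.Chars.splitOn cs [','] = simpleSplit cs := by
  rw [PySem.Chars.splitOn, splitOn_go_comma cs.length.succ cs [] [] (Nat.lt_succ_self _)]
  have := simpleSplit_ne_nil cs
  cases h : simpleSplit cs with
  | nil => exact absurd h this
  | cons p ps => simp

theorem modify_append_singleton {α : Type} (pre : List α) (seg : α) (f : α → α) :
    (pre ++ [seg]).modify pre.length f = pre ++ [f seg] := by
  induction pre with
  | nil => simp [List.modify]
  | cons a as ih =>
    simp only [List.modify, List.length_cons] at ih ⊢
    simp [List.modifyTailIdx, List.modifyTailIdx.go] at ih ⊢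
    exact ih

theorem foldl_parseStep (cs : List Char) (pre : List (List Char)) (seg : List Char) :
    (cs.foldl parseStep (pre ++ [seg], pre.length)).1
      = pre ++ ((seg ++ (simpleSplit (cs.filter parseCond)).headI)
                :: (simpleSplit (cs.filter parseCond)).tail) := by
  induction cs generalizing pre seg with
  | nil => simp [simpleSplit]
  | cons c rest ih =>
    by_cases hcond : parseCond c
    · by_cases hc : c = ','
      · subst hc
        have : parseStep (pre ++ [seg], pre.length) ',' = (pre ++ [seg] ++ [[]], pre.length + 1) := by
          simp [parseStep, hcond]
        rw [List.foldl_cons, this]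
        have hlen : pre.length + 1 = (pre ++ [seg]).length := by simp
        rw [hlen, ih (pre ++ [seg]) []]
        have hne := simpleSplit_ne_nil (rest.filter parseCond)
        cases hs : simpleSplit (rest.filter parseCond) with
        | nil => exact absurd hs hne
        | cons p ps => simp [List.filter, hcond, simpleSplit, hs]
      · have h44 : ¬ c.toNat = 44 := fun hh => hc ((char_comma_iff c).mp hh)
        have : parseStep (pre ++ [seg], pre.length) c
            = (pre ++ [seg ++ [c]], pre.length) := by
          simp [parseStep, hcond, h44, modify_append_singleton]
        rw [List.foldl_cons, this, ih pre (seg ++ [c])]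
        have hne := simpleSplit_ne_nil (rest.filter parseCond)
        cases hs : simpleSplit (rest.filter parseCond) with
        | nil => exact absurd hs hne
        | cons p ps => simp [List.filter, hcond, simpleSplit, hc, hs]
    · have : parseStep (pre ++ [seg], pre.length) c = (pre ++ [seg], pre.length) := by
        simp [parseStep, hcond]
      rw [List.foldl_cons, this, ih pre seg]
      simp [List.filter, hcond]

-- ===== VERDICT (by name: the statement is the Claim_ definition above) =====
theorem parse_spec : Claim_equal_parse := by
  intro string _
  unfold Spec_parse parse parse_alt
  have h := foldl_parseStep string.toList [] []
  simp only [List.nil_append, List.length_nil] at h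
  rw [h]
  show _ = List.map String.ofList (PySem.Chars.splitOn (string.toList.filter parseCond) [','])
  rw [splitOn_comma]
  have hne := simpleSplit_ne_nil (string.toList.filter parseCond)
  cases hs : simpleSplit (string.toList.filter parseCond) with
  | nil => exact absurd hs hne
  | cons p ps => simp
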